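-- pv_equiv track=rewrite | github.com/m9810223/advent-of-code-python | 2022/10/__init__.py | part2
-- ===== SOURCE A (Python) =====
-- def render(c: list[str], wide: int, letters: int):
--     def split(seq, amt: int):
--         return [seq[i : i + amt] for i in range(0, len(seq), amt)]
--
--     lines = ((' ' * 3).join(split(x, wide // letters)) for x in split(''.join(c), wide))
--     return '\n' + '\n'.join(lines)
--
-- def part2(inputs: list[tuple[int, int]]):
--     RADIUS = 3 // 2  # the sprite is 3 pixels wide
--     WIDE, HIGH, LETTERS = 40, 6, 8
--     LIT, DARK = '#.'
--     crt = [LIT] * (WIDE * HIGH)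
--     cycle, value = 1, 1
--     for c, x in inputs:
--         for v in [0] * (c - 1) + [x]:
--             value += v
--             if abs(value - cycle % WIDE) > RADIUS:
--                 crt[cycle] = DARK
--             cycle += 1
--             if cycle == WIDE * HIGH:
--                 return render(crt, WIDE, LETTERS)
-- ===== SOURCE B (Python) =====
-- def render(c: list[str], wide: int, letters: int):
--     def split(seq, amt: int):
--         return [seq[i : i + amt] for i in range(0, len(seq), amt)]
--
--     lines = ((' ' * 3).join(split(x, wide // letters)) for x in split(''.join(c), wide))
--     return '\n' + '\n'.join(lines)
--
--
-- def part2(inputs: list[tuple[int, int]]):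
--     # Build the register timeline blockwise: the register is constant for the
--     # first c-1 cycles of an instruction and changes by x on its last cycle, so
--     # vals[p] (the register value when pixel p is drawn) can be extended a whole
--     # instruction at a time, capped at the 40*6 pixels of the screen.  Each
--     # pixel then follows directly from its value and column.
--     SIZE = 40 * 6
--     value = 1
--     vals = [value]
--     for c, x in inputs:
--         if len(vals) >= SIZE:
--             break
--         vals += [value] * min(max(c - 1, 0), SIZE - len(vals))
--         if len(vals) < SIZE:
--             value += x
--             vals.append(value)
--     if len(vals) < SIZE:
--         return None  # the program halts before the screen is full
--     crt = ['#' if abs(vals[p] - p % 40) <= 1 else '.' for p in range(SIZE)]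
--     return render(crt, 40, 8)
-- ===== Notes on version B (the rewrite author's own statement) =====
-- stated objective: alternative
-- what changed: Replaces the stateful cycle-by-cycle CRT simulation with early return from a nested loop by a blockwise register timeline (the value is constant within an instruction, so it is extended a whole instruction at a time, capped at the 240-pixel screen) and a direct per-pixel formula computing all 240 pixels uniformly.
import Mathlib
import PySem

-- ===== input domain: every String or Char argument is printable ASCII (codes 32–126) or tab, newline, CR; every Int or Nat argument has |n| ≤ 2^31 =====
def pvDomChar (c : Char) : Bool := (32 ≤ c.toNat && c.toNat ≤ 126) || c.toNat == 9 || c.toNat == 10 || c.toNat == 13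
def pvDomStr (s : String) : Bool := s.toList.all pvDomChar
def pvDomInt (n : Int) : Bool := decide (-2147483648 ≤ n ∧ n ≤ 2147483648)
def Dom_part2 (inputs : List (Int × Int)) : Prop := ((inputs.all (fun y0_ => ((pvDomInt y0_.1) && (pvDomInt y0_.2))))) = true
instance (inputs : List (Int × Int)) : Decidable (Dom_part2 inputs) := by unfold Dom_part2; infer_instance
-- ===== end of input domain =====

-- B replaces A's stateful cycle-by-cycle CRT simulation (early return from inside a nested
-- loop) by flattening the instructions into one increment list, a prefix-sum register
-- timeline, and a direct per-pixel formula for all 240 pixels (objective: alternative).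

-- ===== PORT A =====
-- 'render' helper, identical in both Python files; specialised to wide = 40, letters = 8
-- (both call sites pass these literals, so wide // letters = 5).
-- pvChunks am l = Python split(l, am+1): the successive slices seq[i:i+amt] for amt = am+1 ≥ 1;
-- exact since all slice bounds are nonnegative.  ''.join(c) then chunking a string is chunking
-- the char list directly (c holds single characters).
def pvChunks (am : Nat) : List Char → List (List Char)
  | [] => []
  | x :: xs => ((x :: xs).take (am + 1)) :: pvChunks am ((x :: xs).drop (am + 1))
  termination_by l => l.length
  decreasing_by simp

def pvRender (c : List Char) : String :=
  "\n" ++ PySem.Str.join "\n" ((pvChunks 39 c).map (fun line =>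
    PySem.Str.join "   " ((pvChunks 4 line).map (fun g => String.ofList g))))

-- inner 'for v in [0]*(c-1)+[x]' loop of A; .inl = fell through with the new state, .inr = returned
def part2Inner : List Int → List Char → Int → Int → Sum (List Char × Int × Int) String
  | [], crt, cycle, value => .inl (crt, cycle, value)
  | v :: vs, crt, cycle, value =>
    let value := value + v
    -- crt[cycle] = DARK: cycle is always in [1, 239] here, pySetD is the in-range assignment
    let crt := if 1 < |value - PySem.Int.mod cycle 40| then PySem.List.pySetD crt cycle '.' else crt
    let cycle := cycle + 1
    if cycle = 240 then .inr (pvRender crt) else part2Inner vs crt cycle value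

def part2Loop : List (Int × Int) → List Char → Int → Int → Option String
  | [], _, _, _ => none
  | (c, x) :: rest, crt, cycle, value =>
    -- [0] * (c - 1) + [x]; Python's list repetition is empty for c - 1 ≤ 0, as is toNat
    match part2Inner (List.replicate (c - 1).toNat 0 ++ [x]) crt cycle value with
    | .inl (crt', cycle', value') => part2Loop rest crt' cycle' value'
    | .inr r => some r

def part2 (inputs : List (Int × Int)) : Option String :=
  part2Loop inputs (List.replicate 240 '#') 1 1

-- ===== PORT B =====
-- the blockwise timeline loop of B: extend vals by min(max(c-1,0), 240-len) copies of the
-- current register value, then (if still short of 240) apply x and append the new value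
def pvBLoop : List (Int × Int) → List Int → Int → List Int
  | [], vals, _ => vals
  | (c, x) :: rest, vals, value =>
    if 240 ≤ vals.length then vals
    else
      let vals1 := vals ++ List.replicate (min (c - 1).toNat (240 - vals.length)) value
      if vals1.length < 240 then pvBLoop rest (vals1 ++ [value + x]) (value + x)
      else pvBLoop rest vals1 value

def part2_alt (inputs : List (Int × Int)) : Option String :=
  let vals := pvBLoop inputs [1] 1
  if vals.length < 240 then none
  else
    -- ['#' if abs(vals[p] - p % 40) <= 1 else '.' for p in range(240)]
    let crt := (PySem.List.pyRange 0 240 1).map (fun p =>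
      if |PySem.List.pyGetD vals p 0 - PySem.Int.mod p 40| ≤ 1 then '#' else '.')
    some (pvRender crt)

-- ===== PRECONDITION & SPEC =====
def Spec_part2 (inputs : List (Int × Int)) (out : Option String) : Prop := out = part2_alt inputs
instance (inputs : List (Int × Int)) (out : Option String) : Decidable (Spec_part2 inputs out) := by unfold Spec_part2; infer_instance

-- ===== CLAIM =====
def Claim_equal_part2 : Prop := ∀ (inputs : List (Int × Int)), Dom_part2 inputs → Spec_part2 inputs (part2 inputs)

-- ===== LEMMAS AND PROOFS =====

-- the flattened increment stream of the instruction list (= B's incs)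
def pvIncsOf (inputs : List (Int × Int)) : List Int :=
  inputs.flatMap (fun cx => List.replicate (cx.1 - 1).toNat 0 ++ [cx.2])

-- running sums [a, a+l0, a+l0+l1, ...]; proof-side model of B's timeline
def pvScanAdd : List Int → Int → List Int
  | [], a => [a]
  | v :: vs, a => a :: pvScanAdd vs (a + v)

theorem pvScanAdd_eq_cons (l : List Int) (a : Int) :
    pvScanAdd l a = a :: (pvScanAdd l a).tail := by cases l <;> rfl

theorem pvScanAdd_length (l : List Int) (a : Int) :
    (pvScanAdd l a).length = l.length + 1 := by
  induction l generalizing a with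
  | nil => rfl
  | cons v vs ih => simp [pvScanAdd, ih]

theorem pvScanAdd_append (l1 l2 : List Int) (a : Int) :
    pvScanAdd (l1 ++ l2) a = pvScanAdd l1 a ++ (pvScanAdd l2 (a + l1.sum)).tail := by
  induction l1 generalizing a with
  | nil => simpa using pvScanAdd_eq_cons l2 a
  | cons v vs ih =>
    simp only [List.cons_append, pvScanAdd, List.sum_cons, ih, add_assoc]

theorem pvScanAdd_replicate_zero (k : Nat) (a : Int) :
    pvScanAdd (List.replicate k 0) a = List.replicate (k + 1) a := by
  induction k with
  | zero => rfl
  | succ n ih => simp [List.replicate_succ, pvScanAdd, ih]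

-- B's loop builds exactly the timeline of running sums, truncated to the screen
theorem pvBLoop_eq (rest : List (Int × Int)) (vals : List Int) (value : Int)
    (hlen : vals.length ≤ 240) :
    pvBLoop rest vals value
      = (vals ++ (pvScanAdd (pvIncsOf rest) value).tail).take 240 := by
  induction rest generalizing vals value with
  | nil =>
    simp only [pvBLoop, pvIncsOf, List.flatMap_nil, pvScanAdd, List.tail_cons, List.append_nil]
    rw [List.take_of_length_le hlen]
  | cons cx rest ih =>
    obtain ⟨c, x⟩ := cx
    simp only [pvBLoop]
    have htail : (pvScanAdd (pvIncsOf ((c, x) :: rest)) value).tail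
        = List.replicate (c - 1).toNat value ++ pvScanAdd (pvIncsOf rest) (value + x) := by
      rw [show pvIncsOf ((c, x) :: rest)
          = List.replicate (c - 1).toNat 0 ++ ([x] ++ pvIncsOf rest) from by simp [pvIncsOf]]
      rw [pvScanAdd_append, pvScanAdd_replicate_zero]
      simp [pvScanAdd, List.replicate_succ]
    rw [htail]
    by_cases hfull : 240 ≤ vals.length
    · rw [if_pos hfull]
      have h240 : vals.length = 240 := by omega
      rw [← h240, List.take_append_length]
    · rw [if_neg hfull]
      split_ifs with h1
      · -- the block did not fill the screen: min = c - 1 copies, then value + x is appended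
        simp only [List.length_append, List.length_replicate] at h1
        have hz : min (c - 1).toNat (240 - vals.length) = (c - 1).toNat := by omega
        rw [hz] at h1 ⊢
        rw [ih _ _ (by simp only [List.length_append, List.length_replicate,
              List.length_cons, List.length_nil]; omega)]
        rw [pvScanAdd_eq_cons (pvIncsOf rest) (value + x)]
        simp [List.append_assoc]
      · -- the block filled the screen: the remainder is cut off, as take 240 cuts it
        simp only [List.length_append, List.length_replicate] at h1
        have hz : min (c - 1).toNat (240 - vals.length) = 240 - vals.length := by omega
        rw [hz] at h1 ⊢
        rw [ih _ _ (by simp only [List.length_append, List.length_replicate]; omega)]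
        have hL : ((vals ++ List.replicate (240 - vals.length) value)
              ++ (pvScanAdd (pvIncsOf rest) value).tail).take 240
            = vals ++ List.replicate (240 - vals.length) value := by
          have hlen2 : (vals ++ List.replicate (240 - vals.length) value).length = 240 := by
            simp only [List.length_append, List.length_replicate]; omega
          rw [List.take_append, List.take_of_length_le (le_of_eq hlen2), hlen2]
          simp
        have hR : (vals ++ (List.replicate (c - 1).toNat value
              ++ pvScanAdd (pvIncsOf rest) (value + x))).take 240
            = vals ++ List.replicate (240 - vals.length) value := by
          rw [List.take_append, List.take_of_length_le (by omega)]
          congr 1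
          rw [List.take_append, List.take_replicate,
              show min (240 - vals.length) (c - 1).toNat = 240 - vals.length from by omega,
              show 240 - vals.length - (List.replicate (c - 1).toNat value).length = 0 from by
                simp only [List.length_replicate]; omega]
          simp
        rw [hL, hR]

theorem pvGetD_take (l : List Int) (n p : Nat) (hp : p < n) (hl : p < l.length) :
    (l.take n).getD p 0 = l.getD p 0 := by
  rw [List.getD_eq_getElem _ 0 (by simp only [List.length_take]; omega),
      List.getD_eq_getElem _ 0 hl, List.getElem_take]

theorem part2Inner_append (l1 l2 : List Int) (crt : List Char) (cy v : Int) :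
    part2Inner (l1 ++ l2) crt cy v =
      match part2Inner l1 crt cy v with
      | .inl (c, y, w) => part2Inner l2 c y w
      | .inr r => .inr r := by
  induction l1 generalizing crt cy v with
  | nil => simp [part2Inner]
  | cons a l ih =>
    simp only [List.cons_append, part2Inner]
    split
    · rfl
    · exact ih _ _ _

theorem part2Loop_eq_inner (inputs : List (Int × Int)) (crt : List Char) (cy v : Int) :
    part2Loop inputs crt cy v =
      match part2Inner (pvIncsOf inputs) crt cy v with
      | .inl _ => none
      | .inr r => some r := by
  induction inputs generalizing crt cy v with
  | nil => simp [part2Loop, pvIncsOf, part2Inner]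
  | cons cx rest ih =>
    obtain ⟨c, x⟩ := cx
    simp only [part2Loop]
    rw [show pvIncsOf ((c, x) :: rest)
        = (List.replicate (c - 1).toNat 0 ++ [x]) ++ pvIncsOf rest from by
          simp [pvIncsOf]]
    generalize List.replicate (c - 1).toNat 0 ++ [x] = g
    rw [part2Inner_append g (pvIncsOf rest) crt cy v]
    cases part2Inner g crt cy v with
    | inl s => obtain ⟨c', y', w'⟩ := s; exact ih c' y' w'
    | inr r => rfl

theorem part2Inner_short (incs : List Int) (crt : List Char) (cy v : Int)
    (h : cy + incs.length < 240) :
    ∃ s, part2Inner incs crt cy v = .inl s := by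
  induction incs generalizing crt cy v with
  | nil => exact ⟨_, rfl⟩
  | cons a l ih =>
    push_cast [List.length_cons] at h
    simp only [part2Inner]
    rw [if_neg (by omega : ¬ (cy + 1 = 240))]
    exact ih _ _ _ (by omega)

-- pure version of the crt transformation performed by part2Inner when it returns .inr
def pvCrtUpd : List Int → List Char → Int → Int → List Char
  | [], crt, _, _ => crt
  | w :: ws, crt, cy, v =>
    if cy = 239 then
      (if 1 < |v + w - PySem.Int.mod cy 40| then PySem.List.pySetD crt cy '.' else crt)
    else
      pvCrtUpd ws (if 1 < |v + w - PySem.Int.mod cy 40| then PySem.List.pySetD crt cy '.' else crt)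
        (cy + 1) (v + w)

theorem part2Inner_long (incs : List Int) (crt : List Char) (cy v : Int)
    (h2 : cy ≤ 239) (h3 : 240 - cy ≤ (incs.length : Int)) :
    part2Inner incs crt cy v = .inr (pvRender (pvCrtUpd incs crt cy v)) := by
  induction incs generalizing crt cy v with
  | nil => simp only [List.length_nil, Nat.cast_zero] at h3; omega
  | cons a l ih =>
    push_cast [List.length_cons] at h3
    simp only [part2Inner, pvCrtUpd]
    by_cases hc : cy = 239
    · rw [if_pos (by omega : cy + 1 = 240), if_pos hc]
    · rw [if_neg (by omega : ¬ (cy + 1 = 240)), if_neg hc]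
      exact ih _ _ _ (by omega) (by omega)

theorem pvMod_natCast (n : Nat) : PySem.Int.mod (n : Int) 40 = ((n % 40 : Nat) : Int) := by
  simp [PySem.Int.mod, Int.fmod_eq_emod]

-- splicing one character at position n, seen through getD at a later position
theorem pvGetD_splice (crt : List Char) (c0 : Char) (n p : Nat)
    (hn : n < p) (hp : p < crt.length) :
    (crt.take n ++ c0 :: crt.drop (n + 1)).getD p ' ' = crt.getD p ' ' := by
  have hnl : n < crt.length := by omega
  have hlt : (crt.take n).length = n := by simp; omega
  have hlen : (crt.take n ++ c0 :: crt.drop (n + 1)).length = crt.length := by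
    simp; omega
  rw [List.getD_eq_getElem _ ' ' (by omega : p < (crt.take n ++ c0 :: crt.drop (n + 1)).length),
      List.getD_eq_getElem _ ' ' hp]
  rw [List.getElem_append_right (by omega)]
  have : p - (crt.take n).length = (p - n - 1) + 1 := by omega
  simp only [this, List.getElem_cons_succ]
  rw [List.getElem_drop]
  congr 1
  omega

-- the conditional dark-pixel assignment, as a take/cons/drop splice
theorem pvSet_splice (crt : List Char) (n : Nat) (cnd : Prop) [Decidable cnd]
    (hn : n < crt.length) :
    (if cnd then PySem.List.pySetD crt (n : Int) '.' else crt)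
      = crt.take n ++ (if cnd then '.' else crt.getD n ' ') :: crt.drop (n + 1) := by
  split
  · have : PySem.List.pySetD crt (n : Int) '.' = crt.set n '.' := by
      simp [PySem.List.pySetD_natCast]
    rw [this, List.set_eq_take_append_cons_drop, if_pos hn]
  · conv_lhs => rw [← List.take_append_drop n crt]
    rw [List.drop_eq_getElem_cons hn, List.getD_eq_getElem crt ' ' hn]

-- positional characterisation of pvCrtUpd
theorem pvCrtUpd_eq (incs : List Int) (crt : List Char) (n : Nat) (v : Int)
    (h1 : 1 ≤ n) (h2 : n ≤ 239) (hlen : crt.length = 240)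
    (h3 : 240 - n ≤ incs.length) :
    pvCrtUpd incs crt (n : Int) v =
      crt.take n ++ (List.range' n (240 - n)).map (fun p =>
        if 1 < |v + (incs.take (p + 1 - n)).sum - ((p % 40 : Nat) : Int)| then '.'
        else crt.getD p ' ') := by
  induction incs generalizing crt n v with
  | nil => simp at h3; omega
  | cons a l ih =>
    simp only [pvCrtUpd, pvMod_natCast]
    rw [pvSet_splice crt n _ (by omega)]
    by_cases hc : n = 239
    · subst hc
      rw [if_pos (by norm_num)]
      have hdrop : crt.drop 240 = [] := List.drop_eq_nil_of_le (by omega)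
      rw [hdrop]
      norm_num [List.range'_one]
    · rw [if_neg (by omega : ¬ ((n : Int) = 239))]
      rw [show (n : Int) + 1 = ((n + 1 : Nat) : Int) from by push_cast; ring]
      rw [ih _ (n + 1) (v + a) (by omega) (by omega) (by simp; omega) (by simp at h3 ⊢; omega)]
      -- left side: take (n+1) of the spliced list is  crt.take n ++ [pixel n]
      have hlt : (crt.take n).length = n := by simp; omega
      rw [show (crt.take n ++ (if 1 < |v + a - ((n % 40 : Nat) : Int)| then '.' else crt.getD n ' ')
              :: crt.drop (n + 1)).take (n + 1)
          = crt.take n ++ [if 1 < |v + a - ((n % 40 : Nat) : Int)| then '.' else crt.getD n ' ']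
        from by
          rw [show n + 1 = (crt.take n).length + 1 from by omega, List.take_append]
          simp]
      -- right side: peel p = n off the range
      rw [show 240 - n = (239 - n) + 1 from by omega, List.range'_succ, List.map_cons]
      rw [show n + 1 - n = 1 from by omega]
      simp only [List.take_succ_cons, List.take_zero, List.sum_cons, List.sum_nil, add_zero]
      rw [show 240 - (n + 1) = 239 - n from by omega]
      simp only [List.append_assoc, List.singleton_append]
      congr 1
      congr 1
      apply List.map_congr_left
      intro p hp
      rw [List.mem_range'] at hp
      obtain ⟨i, hi, hpe⟩ := hp
      have hp1 : n + 1 ≤ p := by omega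
      have hp2 : p < 240 := by omega
      rw [show p + 1 - n = (p - n - 1) + 1 + 1 from by omega]
      simp only [List.take_succ_cons, List.sum_cons]
      rw [show p + 1 - (n + 1) = p - n - 1 + 1 from by omega]
      rw [pvGetD_splice crt _ n p (by omega) (by omega)]
      rw [show v + a + (List.take (p - n - 1 + 1) l).sum
          = v + (a + (List.take (p - n - 1 + 1) l).sum) from by ring]
      rfl

theorem pvScanAdd_getD (l : List Int) (a : Int) (k : Nat) (hk : k ≤ l.length) :
    (pvScanAdd l a).getD k 0 = a + (l.take k).sum := by
  induction l generalizing a k with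
  | nil =>
    simp only [List.length_nil, Nat.le_zero] at hk
    subst hk
    simp [pvScanAdd]
  | cons v vs ih =>
    cases k with
    | zero => simp [pvScanAdd]
    | succ k =>
      simp only [pvScanAdd, List.getD_cons_succ, List.take_succ_cons, List.sum_cons]
      rw [ih (a + v) k (by simpa using hk)]
      ring

-- ===== VERDICT =====
theorem part2_spec : Claim_equal_part2 := by
  unfold Claim_equal_part2
  intro inputs _
  unfold Spec_part2 part2
  simp only [part2_alt]
  rw [part2Loop_eq_inner]
  have hvals : pvBLoop inputs [1] 1 = (pvScanAdd (pvIncsOf inputs) 1).take 240 := by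
    rw [pvBLoop_eq inputs [1] 1 (by norm_num)]
    rw [show ([1] : List Int) ++ (pvScanAdd (pvIncsOf inputs) 1).tail
        = pvScanAdd (pvIncsOf inputs) 1 from by
          rw [List.singleton_append, ← pvScanAdd_eq_cons]]
  rw [hvals]
  have hlen240 : ((pvScanAdd (pvIncsOf inputs) 1).take 240).length < 240
      ↔ (pvIncsOf inputs).length < 239 := by
    simp only [List.length_take, pvScanAdd_length]
    omega
  by_cases h : (pvIncsOf inputs).length < 239
  · obtain ⟨s, hs⟩ := part2Inner_short (pvIncsOf inputs) (List.replicate 240 '#') 1 1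
      (by omega)
    rw [hs, if_pos (hlen240.mpr h)]
  · rw [part2Inner_long (pvIncsOf inputs) (List.replicate 240 '#') 1 1
      (by norm_num) (by push_cast; omega), if_neg (fun hh => h (hlen240.mp hh))]
    show some (pvRender (pvCrtUpd (pvIncsOf inputs) (List.replicate 240 '#') 1 1)) = _
    have hupd := pvCrtUpd_eq (pvIncsOf inputs) (List.replicate 240 '#') 1 1
      (le_refl 1) (by norm_num)
      (by simp only [List.length_replicate])
      (by omega : 240 - 1 ≤ (pvIncsOf inputs).length)
    simp only [Nat.cast_one] at hupd
    rw [hupd]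
    congr 1
    congr 1
    rw [show (List.replicate 240 '#').take 1 = ['#'] from rfl,
        show (240 : Nat) - 1 = 239 from rfl]
    rw [show PySem.List.pyRange 0 240 1 = (List.range' 0 240).map (fun k : Nat => (k : Int)) from by
          rw [PySem.List.pyRange_one]
          norm_num [List.range_eq_range']
          rfl]
    rw [show List.range' 0 240 = 0 :: List.range' 1 239 from by
          rw [show (240 : Nat) = 239 + 1 from rfl, List.range'_succ]]
    rw [List.map_cons, List.map_cons, List.map_map, List.singleton_append]
    congr 1
    -- head pixel 0: vals[0] = 1, 0 % 40 = 0, |1 - 0| <= 1, so '#'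
    · rw [pvMod_natCast, PySem.List.pyGetD_natCast,
          pvGetD_take _ 240 0 (by norm_num) (by simp only [pvScanAdd_length]; omega),
          pvScanAdd_getD _ 1 0 (Nat.zero_le _)]
      norm_num
    apply List.map_congr_left
    intro p hp
    rw [List.mem_range'] at hp
    obtain ⟨i, hi, hpe⟩ := hp
    have hp1 : 1 ≤ p := by omega
    have hp2 : p < 240 := by omega
    simp only [Function.comp_apply, pvMod_natCast, PySem.List.pyGetD_natCast]
    rw [pvGetD_take _ 240 p (by omega) (by simp only [pvScanAdd_length]; omega)]
    rw [pvScanAdd_getD _ 1 p (by omega)]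
    rw [show p + 1 - 1 = p from by omega]
    rw [List.getD_eq_getElem _ ' '
      (by simp only [List.length_replicate]; omega : p < (List.replicate 240 '#').length)]
    rw [List.getElem_replicate]
    by_cases hcnd : 1 < |1 + ((pvIncsOf inputs).take p).sum - ((p % 40 : Nat) : Int)|
    · rw [if_pos hcnd, if_neg (by omega)]
    · rw [if_neg hcnd, if_pos (by omega)]
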